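-- pv_equiv track=rewrite | github.com/alexandraback/datacollection | solutions_5686313294495744_0/Python/MilesB/problem_c.py | solve
-- ===== SOURCE A (Python) =====
-- def solve(topics):
-- 	left_words = {}
-- 	right_words = {}
--
-- 	for topic in topics:
-- 		left_word = topic[0]
-- 		right_word = topic[1]
--
-- 		if left_word not in left_words:
-- 			left_words[left_word] = 0
-- 		if right_word not in right_words:
-- 			right_words[right_word] = 0
-- 		left_words[left_word] += 1
-- 		right_words[right_word] += 1
--
-- 	fake_count = 0
-- 	done = False
-- 	while not done:
-- 		done = True
-- 		for topic in topics:
-- 			left_word = topic[0]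
-- 			right_word = topic[1]
-- 			if left_words.get(left_word, 0) > 1 and right_words.get(right_word, 0) > 1:
-- 				fake_count += 1
-- 				left_words[left_word] -= 1
-- 				right_words[right_word] -= 1
-- 				done = False
--
--
-- 	return fake_count
-- ===== SOURCE B (Python) =====
-- def solve(topics):
--     left = {}
--     right = {}
--     for l, r in topics:
--         left[l] = left.get(l, 0) + 1
--         right[r] = right.get(r, 0) + 1
--     queue = list(topics)
--     count = 0
--     i = 0
--     while i < len(queue):
--         l, r = queue[i]
--         i += 1
--         if left.get(l, 0) > 1 and right.get(r, 0) > 1: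
--             left[l] -= 1
--             right[r] -= 1
--             count += 1
--             queue.append((l, r))
--     return count
-- ===== Notes on version B (the rewrite author's own statement) =====
-- stated objective: alternative
-- what changed: B replaces A's done-flag while loop of repeated full rescans over topics with a single flat index walk over a growing queue (each occurrence that fires is re-appended to the back), which yields exactly A's firing sequence because a disabled occurrence can never re-enable; the nested pass structure and the done flag disappear.
import Mathlib
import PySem

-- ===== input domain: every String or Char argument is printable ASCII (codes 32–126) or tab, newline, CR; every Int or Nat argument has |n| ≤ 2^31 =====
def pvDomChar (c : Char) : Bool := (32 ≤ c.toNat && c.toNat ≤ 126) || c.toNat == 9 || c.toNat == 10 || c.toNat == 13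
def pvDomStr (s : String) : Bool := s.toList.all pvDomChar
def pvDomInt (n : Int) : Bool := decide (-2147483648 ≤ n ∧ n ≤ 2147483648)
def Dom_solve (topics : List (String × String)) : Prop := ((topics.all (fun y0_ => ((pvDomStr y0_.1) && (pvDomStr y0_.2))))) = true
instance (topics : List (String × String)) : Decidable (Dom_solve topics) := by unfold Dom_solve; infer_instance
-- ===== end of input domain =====

-- B replaces A's repeated full rescans of `topics` (the `done`-flag while loop) with one
-- flat index walk over a growing queue: each occurrence that fires is appended to the
-- back, so the firing sequence — hence the count — is exactly A's; objective: alternative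
-- bookkeeping (no repeated rescans of dead occurrences; no measured speedup claimed).
-- Both while loops are ported as well-founded recursions: every firing strictly lowers
-- the total of the left-degree dictionary (dmeasure below), so both loops terminate.

-- total of the positive left-degree counts: the termination measure both ports cite
def dmeasure (d : PySem.Dict String Int) : Nat :=
  ((PySem.Set.ofList d.keys).map (fun k => (d.getD k 0).toNat)).sum

-- a sum over a nodup list drops when one entry drops and the rest are unchanged
theorem sum_map_lt {k : String} (l : List String) (f g : String → Nat)
    (hnd : l.Nodup) (hk : k ∈ l) (hagree : ∀ x ∈ l, x ≠ k → g x = f x)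
    (hlt : g k < f k) : (l.map g).sum < (l.map f).sum := by
  induction l with
  | nil => cases hk
  | cons a rest ih =>
      rcases List.mem_cons.mp hk with rfl | hk'
      · have : (rest.map g).sum = (rest.map f).sum := by
          apply congrArg List.sum
          apply List.map_congr_left
          intro x hx
          exact hagree x (List.mem_cons_of_mem _ hx)
            (fun h => (List.nodup_cons.mp hnd).1 (h ▸ hx))
        simp only [List.map_cons, List.sum_cons, this]
        omega
      · have := ih (List.nodup_cons.mp hnd).2 hk'
          (fun x hx => hagree x (List.mem_cons_of_mem _ hx))
        have ha : g a = f a :=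
          hagree a List.mem_cons_self (fun h => (List.nodup_cons.mp hnd).1 (h ▸ hk'))
        simp only [List.map_cons, List.sum_cons, ha]
        omega

-- decrementing a count that is > 1 strictly lowers the measure
theorem dmeasure_dec (d : PySem.Dict String Int) (k : String)
    (h : d.getD k 0 > 1) : dmeasure (d.insert k (d.getD k 0 - 1)) < dmeasure d := by
  have hc : d.contains k = true := by
    cases hx : d.contains k
    · rw [PySem.Dict.getD_of_not_contains _ _ hx] at h; omega
    · rfl
  have hkeys : (d.insert k (d.getD k 0 - 1)).keys = d.keys :=
    PySem.Dict.keys_insert_of_contains d _ hc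
  unfold dmeasure
  rw [hkeys]
  apply sum_map_lt (k := k) _ _ _ (PySem.Set.nodup_ofList d.keys)
  · rw [PySem.Set.mem_ofList, ← PySem.Dict.contains_iff_mem_keys]
    exact hc
  · intro x _ hne
    rw [PySem.Dict.getD_insert_of_ne d _ _ hne]
  · rw [PySem.Dict.getD_insert_self]
    omega

-- ===== PORT A =====
-- building loop: if word not in dict: dict[word] = 0; dict[word] += 1
def solveBuild (topics : List (String × String)) (L R : PySem.Dict String Int) :
    PySem.Dict String Int × PySem.Dict String Int :=
  match topics with
  | [] => (L, R)
  | t :: rest =>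
      let L1 := if L.contains t.1 then L else L.insert t.1 0
      let R1 := if R.contains t.2 then R else R.insert t.2 0
      solveBuild rest (L1.insert t.1 (L1.getD t.1 0 + 1)) (R1.insert t.2 (R1.getD t.2 0 + 1))

-- one `for topic in topics` pass of A's while-body, threading the `done` flag
def solvePass (topics : List (String × String)) (L R : PySem.Dict String Int)
    (cnt : Int) (done : Bool) :
    PySem.Dict String Int × PySem.Dict String Int × Int × Bool :=
  match topics with
  | [] => (L, R, cnt, done)
  | t :: rest =>
      if L.getD t.1 0 > 1 ∧ R.getD t.2 0 > 1 then
        solvePass rest (L.insert t.1 (L.getD t.1 0 - 1)) (R.insert t.2 (R.getD t.2 0 - 1))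
          (cnt + 1) false
      else
        solvePass rest L R cnt done

-- a pass never raises the measure
theorem solvePass_mono (topics : List (String × String)) :
    ∀ L R cnt d, dmeasure (solvePass topics L R cnt d).1 ≤ dmeasure L := by
  induction topics with
  | nil => intro L R cnt d; exact le_refl _
  | cons t rest ih =>
      intro L R cnt d
      by_cases hc : L.getD t.1 0 > 1 ∧ R.getD t.2 0 > 1
      · simp only [solvePass, if_pos hc]
        exact le_trans (ih _ _ _ _) (le_of_lt (dmeasure_dec L t.1 hc.1))
      · simp only [solvePass, if_neg hc]
        exact ih _ _ _ _

-- a pass that clears the done flag fired at least once, so it strictly lowers the measure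
theorem solvePass_decreases (topics : List (String × String)) :
    ∀ L R cnt, (solvePass topics L R cnt true).2.2.2 = false →
      dmeasure (solvePass topics L R cnt true).1 < dmeasure L := by
  induction topics with
  | nil => intro L R cnt h; simp [solvePass] at h
  | cons t rest ih =>
      intro L R cnt h
      by_cases hc : L.getD t.1 0 > 1 ∧ R.getD t.2 0 > 1
      · simp only [solvePass, if_pos hc] at *
        exact lt_of_le_of_lt (solvePass_mono rest _ _ _ _) (dmeasure_dec L t.1 hc.1)
      · simp only [solvePass, if_neg hc] at *
        exact ih _ _ _ h

-- `while not done:` — terminates because every non-final pass lowers the measure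
def solveLoop (topics : List (String × String)) (L R : PySem.Dict String Int)
    (cnt : Int) : Int :=
  let res := solvePass topics L R cnt true
  if _h : res.2.2.2 = true then res.2.2.1
  else solveLoop topics res.1 res.2.1 res.2.2.1
termination_by dmeasure L
decreasing_by
  exact solvePass_decreases topics L R cnt (by simpa using _h)

def solve (topics : List (String × String)) : Int :=
  match solveBuild topics PySem.Dict.empty PySem.Dict.empty with
  | (L, R) => solveLoop topics L R 0

-- ===== PORT B =====
-- building loop: dict[word] = dict.get(word, 0) + 1
def altBuild (topics : List (String × String)) (L R : PySem.Dict String Int) :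
    PySem.Dict String Int × PySem.Dict String Int :=
  match topics with
  | [] => (L, R)
  | t :: rest =>
      altBuild rest (L.insert t.1 (L.getD t.1 0 + 1)) (R.insert t.2 (R.getD t.2 0 + 1))

-- Source B's `while i < len(queue)` walk, with `queue` represented by its unread suffix
-- queue[i:] (entries before i are never read again; queue.append appends to this
-- suffix's end); a fire lowers dmeasure, a skip shortens the suffix, so it terminates
def altGo (queue : List (String × String)) (L R : PySem.Dict String Int)
    (cnt : Int) : Int :=
  match queue with
  | [] => cnt
  | t :: rest =>
      if h : L.getD t.1 0 > 1 ∧ R.getD t.2 0 > 1 then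
        altGo (rest ++ [t]) (L.insert t.1 (L.getD t.1 0 - 1))
          (R.insert t.2 (R.getD t.2 0 - 1)) (cnt + 1)
      else
        altGo rest L R cnt
termination_by (dmeasure L, queue.length)
decreasing_by
  · exact Prod.Lex.left _ _ (dmeasure_dec L t.1 h.1)
  · exact Prod.Lex.right _ (by simp)

def solve_alt (topics : List (String × String)) : Int :=
  match altBuild topics PySem.Dict.empty PySem.Dict.empty with
  | (L, R) => altGo topics L R 0

-- ===== PRECONDITION & SPEC =====
def Spec_solve (topics : List (String × String)) (out : Int) : Prop := out = solve_alt topics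
instance (topics : List (String × String)) (out : Int) : Decidable (Spec_solve topics out) := by
  unfold Spec_solve; infer_instance

-- ===== CLAIM (what is proved, stated in full; the proofs are below) =====
def Claim_equal_solve : Prop := ∀ (topics : List (String × String)), Dom_solve topics → Spec_solve topics (solve topics)

-- ===== LEMMAS AND PROOFS =====

-- pointwise ≤ on the degree dictionaries (lookups with default 0)
def dle (d d' : PySem.Dict String Int) : Prop := ∀ k, d.getD k 0 ≤ d'.getD k 0

-- an occurrence whose condition fails (it can never fire again)
def Dead (L R : PySem.Dict String Int) (t : String × String) : Prop :=
  ¬ (L.getD t.1 0 > 1 ∧ R.getD t.2 0 > 1)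

-- ys is xs with some occurrences removed that are Dead at (L, R)
inductive Merge (L R : PySem.Dict String Int) :
    List (String × String) → List (String × String) → Prop
  | nil : Merge L R [] []
  | skip (t : String × String) {xs ys : List (String × String)} :
      Dead L R t → Merge L R xs ys → Merge L R (t :: xs) ys
  | keep (t : String × String) {xs ys : List (String × String)} :
      Merge L R xs ys → Merge L R (t :: xs) (t :: ys)

-- proof-side pass over a worklist, returning the fired occurrences (the appended ones)
def altPass (active : List (String × String)) (L R : PySem.Dict String Int) (cnt : Int) :
    PySem.Dict String Int × PySem.Dict String Int × Int × List (String × String) :=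
  match active with
  | [] => (L, R, cnt, [])
  | t :: rest =>
      if L.getD t.1 0 > 1 ∧ R.getD t.2 0 > 1 then
        match altPass rest (L.insert t.1 (L.getD t.1 0 - 1)) (R.insert t.2 (R.getD t.2 0 - 1))
            (cnt + 1) with
        | (L', R', cnt', nxt) => (L', R', cnt', t :: nxt)
      else
        altPass rest L R cnt

theorem dle_refl (d : PySem.Dict String Int) : dle d d := fun _ => le_refl _

theorem dle_trans {a b c : PySem.Dict String Int} (h1 : dle a b) (h2 : dle b c) : dle a c :=
  fun k => le_trans (h1 k) (h2 k)

theorem dle_dec (d : PySem.Dict String Int) (k : String) :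
    dle (d.insert k (d.getD k 0 - 1)) d := by
  intro k'
  rw [PySem.Dict.getD_insert]
  split_ifs with h
  · subst h; omega
  · exact le_refl _

theorem Dead_mono {L R L' R' : PySem.Dict String Int} {t : String × String}
    (hL : dle L L') (hR : dle R R') (h : Dead L' R' t) : Dead L R t := by
  unfold Dead at *
  intro hc
  exact h ⟨lt_of_lt_of_le hc.1 (hL t.1), lt_of_lt_of_le hc.2 (hR t.2)⟩

theorem Merge_refl (L R : PySem.Dict String Int) (xs : List (String × String)) :
    Merge L R xs xs := by
  induction xs with
  | nil => exact Merge.nil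
  | cons t rest ih => exact Merge.keep t ih

theorem Merge_compose {L0 R0 L1 R1 : PySem.Dict String Int}
    {xs ys zs : List (String × String)}
    (h1 : Merge L0 R0 xs ys) (h2 : Merge L1 R1 ys zs)
    (hL : dle L1 L0) (hR : dle R1 R0) : Merge L1 R1 xs zs := by
  induction h1 generalizing zs with
  | nil => cases h2; exact Merge.nil
  | skip t hd _ ih => exact Merge.skip t (Dead_mono hL hR hd) (ih h2)
  | keep t _ ih =>
      cases h2 with
      | skip _ hd h2' => exact Merge.skip t hd (ih h2')
      | keep _ h2' => exact Merge.keep t (ih h2')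

-- a pass over the full list equals the pass over the worklist; A's done flag is
-- `d && nxt.isEmpty`
theorem pass_eq {L0 R0 : PySem.Dict String Int} {xs ys : List (String × String)}
    (hm : Merge L0 R0 xs ys) :
    ∀ (L R : PySem.Dict String Int), dle L L0 → dle R R0 → ∀ (cnt : Int) (d : Bool),
      solvePass xs L R cnt d =
        ((altPass ys L R cnt).1, (altPass ys L R cnt).2.1, (altPass ys L R cnt).2.2.1,
          d && (altPass ys L R cnt).2.2.2.isEmpty) := by
  induction hm with
  | nil =>
      intro L R _ _ cnt d
      simp [solvePass, altPass]
  | skip t hd _ ih =>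
      intro L R hL hR cnt d
      have hdead : ¬ (L.getD t.1 0 > 1 ∧ R.getD t.2 0 > 1) :=
        Dead_mono hL hR hd
      simp only [solvePass, if_neg hdead]
      exact ih L R hL hR cnt d
  | keep t _ ih =>
      intro L R hL hR cnt d
      by_cases hc : L.getD t.1 0 > 1 ∧ R.getD t.2 0 > 1
      · have hL' : dle (L.insert t.1 (L.getD t.1 0 - 1)) L0 :=
          dle_trans (dle_dec L t.1) hL
        have hR' : dle (R.insert t.2 (R.getD t.2 0 - 1)) R0 :=
          dle_trans (dle_dec R t.2) hR
        simp only [solvePass, altPass, if_pos hc]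
        rw [ih _ _ hL' hR' (cnt + 1) false]
        simp
      · simp only [solvePass, altPass, if_neg hc]
        exact ih L R hL hR cnt d

-- the worklist pass yields a Merge of its input onto the fired occurrences, at the
-- resulting (smaller) dictionaries
theorem passB_merge (ys : List (String × String)) :
    ∀ (L R : PySem.Dict String Int) (cnt : Int),
      Merge (altPass ys L R cnt).1 (altPass ys L R cnt).2.1 ys (altPass ys L R cnt).2.2.2 ∧
      dle (altPass ys L R cnt).1 L ∧ dle (altPass ys L R cnt).2.1 R := by
  induction ys with
  | nil =>
      intro L R cnt
      exact ⟨Merge.nil, dle_refl L, dle_refl R⟩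
  | cons t rest ih =>
      intro L R cnt
      by_cases hc : L.getD t.1 0 > 1 ∧ R.getD t.2 0 > 1
      · simp only [altPass, if_pos hc]
        obtain ⟨hmrg, hL, hR⟩ := ih (L.insert t.1 (L.getD t.1 0 - 1))
          (R.insert t.2 (R.getD t.2 0 - 1)) (cnt + 1)
        exact ⟨Merge.keep t hmrg,
          dle_trans hL (dle_dec L t.1), dle_trans hR (dle_dec R t.2)⟩
      · simp only [altPass, if_neg hc]
        obtain ⟨hmrg, hL, hR⟩ := ih L R cnt
        exact ⟨Merge.skip t (Dead_mono hL hR hc) hmrg, hL, hR⟩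

-- walking the queue past `xs` with accumulated tail `acc` performs exactly the
-- worklist pass over `xs`, appending the fired occurrences behind `acc`
theorem altGo_step (xs : List (String × String)) :
    ∀ (acc : List (String × String)) (L R : PySem.Dict String Int) (cnt : Int),
      altGo (xs ++ acc) L R cnt =
        altGo (acc ++ (altPass xs L R cnt).2.2.2) (altPass xs L R cnt).1
          (altPass xs L R cnt).2.1 (altPass xs L R cnt).2.2.1 := by
  induction xs with
  | nil => intro acc L R cnt; simp [altPass]
  | cons t rest ih =>
      intro acc L R cnt
      by_cases hc : L.getD t.1 0 > 1 ∧ R.getD t.2 0 > 1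
      · rw [List.cons_append, altGo, dif_pos hc, List.append_assoc]
        rw [ih (acc ++ [t])]
        simp only [altPass, if_pos hc]
        cases hp : altPass rest (L.insert t.1 (L.getD t.1 0 - 1))
            (R.insert t.2 (R.getD t.2 0 - 1)) (cnt + 1) with
        | mk L' p =>
            cases p with
            | mk R' q =>
                cases q with
                | mk cnt' nxt => simp
      · rw [List.cons_append, altGo, dif_neg hc]
        simp only [altPass, if_neg hc]
        exact ih acc L R cnt

-- the pass-synchronised simulation: A's while loop over the full list equals B's
-- queue walk over any Dead-pruned version of it
theorem loop_eq (topics : List (String × String)) :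
    ∀ (n : Nat) (L R : PySem.Dict String Int), dmeasure L ≤ n →
      ∀ (cnt : Int) (ys : List (String × String)), Merge L R topics ys →
        solveLoop topics L R cnt = altGo ys L R cnt := by
  intro n
  induction n with
  | zero =>
      intro L R hle cnt ys hm
      -- measure 0: a pass cannot fire (firing needs getD > 1, which forces measure ≥ 2)
      have hnofire : (solvePass topics L R cnt true).2.2.2 = true := by
        by_contra h
        have := solvePass_decreases topics L R cnt (by simpa using h)
        omega
      have hp := pass_eq hm L R (dle_refl L) (dle_refl R) cnt true
      have hq : altGo ys L R cnt =
          altGo (altPass ys L R cnt).2.2.2 (altPass ys L R cnt).1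
            (altPass ys L R cnt).2.1 (altPass ys L R cnt).2.2.1 := by
        have := altGo_step ys [] L R cnt
        simpa using this
      rw [solveLoop, dif_pos hnofire]
      rw [hp] at hnofire ⊢
      simp only [Bool.true_and, List.isEmpty_iff] at hnofire
      rw [hq, hnofire]
      simp [altGo]
  | succ n ih =>
      intro L R hle cnt ys hm
      have hp := pass_eq hm L R (dle_refl L) (dle_refl R) cnt true
      obtain ⟨hmrg, hLd, hRd⟩ := passB_merge ys L R cnt
      have hq : altGo ys L R cnt =
          altGo (altPass ys L R cnt).2.2.2 (altPass ys L R cnt).1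
            (altPass ys L R cnt).2.1 (altPass ys L R cnt).2.2.1 := by
        have := altGo_step ys [] L R cnt
        simpa using this
      by_cases hdone : (solvePass topics L R cnt true).2.2.2 = true
      · rw [solveLoop, dif_pos hdone]
        rw [hp] at hdone ⊢
        simp only [Bool.true_and, List.isEmpty_iff] at hdone
        rw [hq, hdone]
        simp [altGo]
      · rw [solveLoop, dif_neg hdone]
        have hdec := solvePass_decreases topics L R cnt (by simpa using hdone)
        rw [hp] at hdec ⊢
        have hm' : Merge (altPass ys L R cnt).1 (altPass ys L R cnt).2.1 topics
            (altPass ys L R cnt).2.2.2 := Merge_compose hm hmrg hLd hRd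
        rw [hq]
        exact ih _ _ (by omega) _ _ hm'

theorem build_eq (topics : List (String × String)) :
    ∀ (L R : PySem.Dict String Int), solveBuild topics L R = altBuild topics L R := by
  induction topics with
  | nil => intro L R; rfl
  | cons t rest ih =>
      intro L R
      have hL : (if L.contains t.1 then L else L.insert t.1 0).insert t.1
          ((if L.contains t.1 then L else L.insert t.1 0).getD t.1 0 + 1) =
          L.insert t.1 (L.getD t.1 0 + 1) := by
        by_cases h : L.contains t.1 = true
        · simp [h]
        · have h' : L.contains t.1 = false := by
            cases hx : L.contains t.1
            · rfl
            · exact absurd hx h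
          simp [h', PySem.Dict.getD_insert_self, PySem.Dict.insert_insert_self,
            PySem.Dict.getD_of_not_contains _ _ h']
      have hR : (if R.contains t.2 then R else R.insert t.2 0).insert t.2
          ((if R.contains t.2 then R else R.insert t.2 0).getD t.2 0 + 1) =
          R.insert t.2 (R.getD t.2 0 + 1) := by
        by_cases h : R.contains t.2 = true
        · simp [h]
        · have h' : R.contains t.2 = false := by
            cases hx : R.contains t.2
            · rfl
            · exact absurd hx h
          simp [h', PySem.Dict.getD_insert_self, PySem.Dict.insert_insert_self,
            PySem.Dict.getD_of_not_contains _ _ h']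
      simp only [solveBuild, altBuild, hL, hR, ih]

-- ===== VERDICT (by name: the statement is the Claim_ definition above) =====
theorem solve_spec : Claim_equal_solve := by
  intro topics _
  unfold Spec_solve solve solve_alt
  rw [build_eq]
  cases altBuild topics PySem.Dict.empty PySem.Dict.empty with
  | mk L R =>
      exact loop_eq topics (dmeasure L) L R (le_refl _) 0 topics (Merge_refl L R topics)
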